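-- pv_equiv track=rewrite | github.com/liv-daliberti/maxent-grpo | src/maxent_grpo/training/eval.py | _iter_eval_batches
-- ===== SOURCE A (Python) =====
-- from typing import Any, Dict, Iterator, List, Optional, Tuple, cast
--
-- def _iter_eval_batches(
--     evaluation_rows: List[dict],
--     batch_size: int,
-- ) -> Iterator[Tuple[List[str], List[str]]]:
--     """Yield prompt/answer lists for evaluation rows.
--
--     :param evaluation_rows: Serialized evaluation records containing prompts
--         and optional answers.
--     :type evaluation_rows: list[dict]
--     :param batch_size: Number of rows per batch.
--     :type batch_size: int
--     :yields: Tuple containing batched prompts and answers.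
--     :rtype: Iterator[tuple[list[str], list[str]]]
--     :returns: Iterator over prompt and answer batches.
--     :rtype: collections.abc.Iterator[tuple[list[str], list[str]]]
--     """
--     for batch_start in range(0, len(evaluation_rows), batch_size):
--         batch_rows = evaluation_rows[batch_start : batch_start + batch_size]
--         prompts = [row["prompt"] for row in batch_rows]
--         if not prompts:
--             continue
--         answers = [row.get("answer", "") for row in batch_rows]
--         yield prompts, answers
-- ===== SOURCE B (Python) =====
-- def _iter_eval_batches(evaluation_rows, batch_size):
--     """Streaming batcher: one pass, two accumulators, no index arithmetic."""
--     if batch_size < 1: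
--         return
--     prompts = []
--     answers = []
--     for row in evaluation_rows:
--         prompts.append(row["prompt"])
--         answers.append(row.get("answer", ""))
--         if len(prompts) == batch_size:
--             yield prompts, answers
--             prompts = []
--             answers = []
--     if prompts:
--         yield prompts, answers
-- ===== Notes on version B (the rewrite author's own statement) =====
-- stated objective: simpler
-- what changed: Replaced the index/range/slice chunking with a batch-size guard plus a single streaming pass that appends each row's prompt and answer to two accumulator lists, emitting and resetting them whenever the batch size is reached and emitting the non-empty remainder at the end.
import Mathlib
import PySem

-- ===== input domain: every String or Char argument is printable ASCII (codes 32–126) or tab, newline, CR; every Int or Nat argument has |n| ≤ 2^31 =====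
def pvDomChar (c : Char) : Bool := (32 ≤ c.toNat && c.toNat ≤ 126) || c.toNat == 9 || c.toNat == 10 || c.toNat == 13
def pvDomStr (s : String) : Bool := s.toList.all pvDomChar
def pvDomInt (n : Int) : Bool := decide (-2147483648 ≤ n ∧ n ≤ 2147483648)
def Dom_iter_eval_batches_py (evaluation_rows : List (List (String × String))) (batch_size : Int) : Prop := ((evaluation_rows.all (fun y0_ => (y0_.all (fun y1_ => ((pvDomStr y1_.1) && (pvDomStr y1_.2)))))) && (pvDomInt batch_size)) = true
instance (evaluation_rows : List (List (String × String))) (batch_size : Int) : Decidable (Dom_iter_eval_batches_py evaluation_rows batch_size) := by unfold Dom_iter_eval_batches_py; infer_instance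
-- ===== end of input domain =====

-- B replaces A's index/range/slice chunking by a single streaming pass with two accumulator lists (simpler decomposition, same cost).

-- ===== PORT A =====
-- literal port of A: for batch_start in range(0, len(rows), batch_size): slice, build prompts/answers, skip empty, yield
def iter_eval_batches_py (evaluation_rows : List (List (String × String))) (batch_size : Int) : List (List String × List String) :=
  (PySem.List.pyRange 0 (evaluation_rows.length : Int) batch_size).foldl
    (fun acc batch_start =>
      let batch_rows := PySem.List.slice evaluation_rows (some batch_start) (some (batch_start + batch_size))
      let prompts := batch_rows.map (fun row => (row.lookup "prompt").getD "")
      if prompts = [] then acc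
      else
        let answers := batch_rows.map (fun row => (row.lookup "answer").getD "")
        acc ++ [(prompts, answers)]) []

-- ===== PORT B =====
-- B's loop body: append prompt/answer of the current row; emit and reset when the batch is full; emit the remainder at the end
def iter_eval_batches_go (batch_size : Int) :
    List (List (String × String)) → List String → List String → List (List String × List String)
  | [], prompts, answers => if prompts = [] then [] else [(prompts, answers)]
  | row :: rest, prompts, answers =>
      let prompts' := prompts ++ [(row.lookup "prompt").getD ""]
      let answers' := answers ++ [(row.lookup "answer").getD ""]
      if (prompts'.length : Int) = batch_size then
        (prompts', answers') :: iter_eval_batches_go batch_size rest [] []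
      else
        iter_eval_batches_go batch_size rest prompts' answers'

def iter_eval_batches_py_alt (evaluation_rows : List (List (String × String))) (batch_size : Int) : List (List String × List String) :=
  if batch_size < 1 then []
  else iter_eval_batches_go batch_size evaluation_rows [] []

-- ===== PRECONDITION & SPEC =====
-- Pre_ excludes exactly the inputs on which A raises: batch_size = 0 (A's range(0, n, 0) raises ValueError) and
-- a row without a "prompt" key under positive batch_size (row["prompt"] raises KeyError); for negative batch_size
-- A touches no row and yields nothing, which B's batch-size guard reproduces.
def Pre_iter_eval_batches_py (evaluation_rows : List (List (String × String))) (batch_size : Int) : Prop :=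
  batch_size < 0 ∨ (1 ≤ batch_size ∧ ∀ row ∈ evaluation_rows, "prompt" ∈ row.map Prod.fst)
instance (evaluation_rows : List (List (String × String))) (batch_size : Int) : Decidable (Pre_iter_eval_batches_py evaluation_rows batch_size) := by unfold Pre_iter_eval_batches_py; infer_instance
def pvWitness_iter_eval_batches_py : (List (List (String × String))) × Int :=
  ([[("prompt", "p1"), ("answer", "a1")], [("prompt", "p2")], [("prompt", "p3"), ("answer", "a3")]], 2)

def Spec_iter_eval_batches_py (evaluation_rows : List (List (String × String))) (batch_size : Int) (out : List (List String × List String)) : Prop := out = iter_eval_batches_py_alt evaluation_rows batch_size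
instance (evaluation_rows : List (List (String × String))) (batch_size : Int) (out : List (List String × List String)) : Decidable (Spec_iter_eval_batches_py evaluation_rows batch_size out) := by unfold Spec_iter_eval_batches_py; infer_instance

-- ===== CLAIM (what is proved, stated in full; the proofs are below) =====
def Claim_equal_iter_eval_batches_py : Prop := ∀ (evaluation_rows : List (List (String × String))) (batch_size : Int), Dom_iter_eval_batches_py evaluation_rows batch_size → Pre_iter_eval_batches_py evaluation_rows batch_size → Spec_iter_eval_batches_py evaluation_rows batch_size (iter_eval_batches_py evaluation_rows batch_size)

-- ===== LEMMAS AND PROOFS =====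

-- Reference chunking: both ports are proved equal to this take/drop recursion.
def pvBatches (k : Nat) : List (List (String × String)) → List (List String × List String)
  | [] => []
  | row :: rest =>
      (((row :: rest).take k).map (fun r => (r.lookup "prompt").getD ""),
       ((row :: rest).take k).map (fun r => (r.lookup "answer").getD "")) ::
      pvBatches k (rest.drop (k - 1))
termination_by rows => rows.length
decreasing_by
  simp only [List.length_drop, List.length_cons]; omega

theorem pvBatches_cons_of (k : Nat) (hk : 0 < k) (rows : List (List (String × String))) (h : rows ≠ []) :
    pvBatches k rows =
      ((rows.take k).map (fun r => (r.lookup "prompt").getD ""),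
       (rows.take k).map (fun r => (r.lookup "answer").getD "")) :: pvBatches k (rows.drop k) := by
  cases rows with
  | nil => exact absurd rfl h
  | cons row rest =>
    rw [pvBatches]
    obtain ⟨k', rfl⟩ : ∃ k', k = k' + 1 := ⟨k - 1, by omega⟩
    simp [List.drop_succ_cons]

-- B's accumulators always hold the prompts/answers of some prefix `pre` shorter than the batch size.
theorem go_eq_pvBatches (k : Nat) (hk : 0 < k) :
    ∀ (rows pre : List (List (String × String))), pre.length < k →
      iter_eval_batches_go (k : Int) rows
        (pre.map (fun r => (r.lookup "prompt").getD ""))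
        (pre.map (fun r => (r.lookup "answer").getD "")) = pvBatches k (pre ++ rows) := by
  intro rows
  induction rows with
  | nil =>
    intro pre hpre
    rw [iter_eval_batches_go]
    cases pre with
    | nil => simp [pvBatches]
    | cons p ps =>
      rw [List.append_nil, pvBatches]
      have hlen : ps.length + 1 < k := by simpa using hpre
      have hdrop : ps.drop (k - 1) = [] := List.drop_eq_nil_of_le (by omega)
      have htake : (p :: ps).take k = p :: ps := List.take_of_length_le (by simp; omega)
      rw [if_neg (by simp), hdrop, htake, pvBatches]
  | cons row rest ih =>
    intro pre hpre
    rw [iter_eval_batches_go]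
    have hmapp : ∀ (f : List (String × String) → String),
        pre.map f ++ [f row] = (pre ++ [row]).map f := by
      intro f; rw [List.map_append]; rfl
    by_cases hfull : pre.length + 1 = k
    · have hcond : (((pre.map (fun r => (r.lookup "prompt").getD "")) ++
          [(row.lookup "prompt").getD ""]).length : Int) = (k : Int) := by
        simp [hfull]
      have h0 := ih [] (by simpa using hk)
      simp only [List.map_nil, List.nil_append] at h0
      rw [if_pos hcond, hmapp, hmapp, h0]
      rw [pvBatches_cons_of k hk (pre ++ row :: rest) (by simp)]
      have hsplit : pre ++ row :: rest = (pre ++ [row]) ++ rest := by simp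
      have htake : (pre ++ row :: rest).take k = pre ++ [row] := by
        rw [hsplit, List.take_append_of_le_length (by simp; omega),
          List.take_of_length_le (by simp; omega)]
      have hdrop : (pre ++ row :: rest).drop k = rest := by
        rw [hsplit, List.drop_append_of_le_length (by simp; omega),
          List.drop_eq_nil_of_le (by simp; omega), List.nil_append]
      rw [htake, hdrop]
    · have hcond : ¬((((pre.map (fun r => (r.lookup "prompt").getD "")) ++
          [(row.lookup "prompt").getD ""]).length : Int) = (k : Int)) := by
        simp; omega
      rw [if_neg hcond, hmapp, hmapp, ih (pre ++ [row]) (by simp; omega)]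
      simp

theorem alt_eq_pvBatches (rows : List (List (String × String))) (bs : Int) (hbs : 1 ≤ bs) :
    iter_eval_batches_py_alt rows bs = pvBatches bs.toNat rows := by
  have hk : 0 < bs.toNat := by omega
  have hcast : ((bs.toNat : Int)) = bs := by omega
  have h := go_eq_pvBatches bs.toNat hk rows [] (by simpa using hk)
  rw [iter_eval_batches_py_alt, if_neg (by omega)]
  simpa [hcast] using h

-- range(0, n, s) for 0 < n, 0 < s peels off its first element.
theorem pyRange_pos_cons (n s : Int) (hn : 0 < n) (hs : 0 < s) :
    PySem.List.pyRange 0 n s = 0 :: (PySem.List.pyRange 0 (n - s) s).map (· + s) := by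
  rw [PySem.List.pyRange_of_pos _ _ hs, PySem.List.pyRange_of_pos _ _ hs]
  have hstep : (n - 0 + s - 1) / s = (n - 1) / s + 1 := by
    have h : n - 0 + s - 1 = (n - 1) + 1 * s := by ring
    rw [h, Int.add_mul_ediv_right _ _ (by omega : s ≠ 0)]
  have hq : 0 ≤ (n - 1) / s := Int.ediv_nonneg (by omega) (by omega)
  by_cases hns : 0 < n - s
  · have hq' : (n - s - 0 + s - 1) / s = (n - 1) / s := by ring_nf
    have htn : ((n - 1) / s + 1).toNat = ((n - 1) / s).toNat + 1 := by omega
    rw [if_pos hn, if_pos hns, hstep, hq', htn, List.range_succ_eq_map,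
      List.map_cons, List.map_map, List.map_map]
    congr 1
    · norm_num
    · apply List.map_congr_left
      intro a _
      simp [Function.comp]
      ring
  · have hq0 : (n - 1) / s = 0 := Int.ediv_eq_zero_of_lt (by omega) (by omega)
    rw [if_pos hn, if_neg hns, hstep, hq0]
    simp [List.range_succ_eq_map]

-- the yielded batch at batch_start i is rows[i:i+bs] = take bs (drop i rows)
theorem slice_batch (bs : Int) (hbs : 1 ≤ bs) (rs : List (List (String × String))) (i : Int)
    (h0 : 0 ≤ i) :
    PySem.List.slice rs (some i) (some (i + bs)) = (rs.drop i.toNat).take bs.toNat := by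
  rw [PySem.List.slice_toNat rs h0 (by omega)]
  congr 1
  omega

-- A's fold never takes the skip branch: turn it into a map over the range
theorem a_foldl_to_map (bs : Int) (hbs : 1 ≤ bs) (rs : List (List (String × String))) :
    iter_eval_batches_py rs bs =
      (PySem.List.pyRange 0 (rs.length : Int) bs).map (fun i =>
        ((PySem.List.slice rs (some i) (some (i + bs))).map
            (fun row => (row.lookup "prompt").getD ""),
         (PySem.List.slice rs (some i) (some (i + bs))).map
            (fun row => (row.lookup "answer").getD ""))) := by
  unfold iter_eval_batches_py
  rw [PySem.List.foldl_congr_mem _ _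
    (fun acc i =>
      acc ++ [((PySem.List.slice rs (some i) (some (i + bs))).map
                 (fun row => (row.lookup "prompt").getD ""),
               (PySem.List.slice rs (some i) (some (i + bs))).map
                 (fun row => (row.lookup "answer").getD ""))]) _ ?_]
  · rw [PySem.List.foldl_append_singleton_eq_map, List.nil_append]
  · intro acc i hi
    obtain ⟨h0, hltn, -⟩ := (PySem.List.mem_pyRange_iff_of_pos (by omega : (0:Int) < bs) i).1 hi
    rw [slice_batch bs hbs rs i h0]
    have hne : ((rs.drop i.toNat).take bs.toNat) ≠ [] := by
      have hl : ((rs.drop i.toNat).take bs.toNat).length = min bs.toNat (rs.length - i.toNat) := by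
        simp [List.length_take, List.length_drop]
      intro hcontra
      rw [hcontra] at hl
      simp at hl
      omega
    dsimp only
    rw [if_neg (by simpa using hne), slice_batch bs hbs rs i h0]

theorem a_eq_pvBatches (rows : List (List (String × String))) (bs : Int) (hbs : 1 ≤ bs) :
    iter_eval_batches_py rows bs = pvBatches bs.toNat rows := by
  rw [a_foldl_to_map bs hbs rows]
  suffices h : ∀ N (rs : List (List (String × String))), rs.length ≤ N →
      (PySem.List.pyRange 0 (rs.length : Int) bs).map (fun i =>
        ((PySem.List.slice rs (some i) (some (i + bs))).map
            (fun row => (row.lookup "prompt").getD ""),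
         (PySem.List.slice rs (some i) (some (i + bs))).map
            (fun row => (row.lookup "answer").getD ""))) = pvBatches bs.toNat rs by
    exact h rows.length rows le_rfl
  intro N
  induction N with
  | zero =>
    intro rs hrs
    have : rs = [] := List.eq_nil_of_length_eq_zero (by omega)
    subst this
    simp [PySem.List.pyRange_of_pos 0 0 (by omega : (0:Int) < bs), pvBatches]
  | succ N ih =>
    intro rs hrs
    by_cases hemp : rs = []
    · subst hemp
      simp [PySem.List.pyRange_of_pos 0 0 (by omega : (0:Int) < bs), pvBatches]
    · have hn : 0 < (rs.length : Int) := by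
        have := List.length_pos_iff.2 hemp; omega
      rw [pyRange_pos_cons _ _ hn (by omega), List.map_cons, List.map_map,
        pvBatches_cons_of bs.toNat (by omega) rs hemp]
      congr 1
      · rw [slice_batch bs hbs rs 0 le_rfl]
        simp
      · by_cases hrest : (0:Int) < (rs.length : Int) - bs
        · have hlen : (((rs.drop bs.toNat).length : Int)) = (rs.length : Int) - bs := by
            simp [List.length_drop]; omega
          rw [← ih (rs.drop bs.toNat) (by simp [List.length_drop]; omega), ← hlen]
          apply List.map_congr_left
          intro i hi
          rw [hlen] at hi
          obtain ⟨h0, hltn, -⟩ :=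
            (PySem.List.mem_pyRange_iff_of_pos (by omega : (0:Int) < bs) i).1 hi
          simp only [Function.comp]
          have h1 : PySem.List.slice rs (some (i + bs)) (some (i + bs + bs)) =
              ((rs.drop bs.toNat).drop i.toNat).take bs.toNat := by
            rw [PySem.List.slice_toNat rs (by omega) (by omega), List.drop_drop]
            congr 1
            · omega
            · congr 1; omega
          have h2 : PySem.List.slice (rs.drop bs.toNat) (some i) (some (i + bs)) =
              ((rs.drop bs.toNat).drop i.toNat).take bs.toNat := by
            rw [PySem.List.slice_toNat _ (by omega) (by omega)]
            congr 1
            omega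
          rw [h1, h2]
        · have h1 : PySem.List.pyRange 0 ((rs.length : Int) - bs) bs = [] := by
            rw [PySem.List.pyRange_of_pos _ _ (by omega : (0:Int) < bs), if_neg (by omega)]
            simp
          have h2 : rs.drop bs.toNat = [] := List.drop_eq_nil_of_le (by omega)
          rw [h1, h2]
          simp [pvBatches]

-- ===== VERDICT (by name: the statement is the Claim_ definition above) =====
theorem iter_eval_batches_py_spec : Claim_equal_iter_eval_batches_py := by
  intro rows bs _ hpre
  unfold Spec_iter_eval_batches_py
  rcases hpre with hneg | ⟨hbs, -⟩
  · -- negative batch size: A's range is empty, B's guard fires; both return []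
    rw [iter_eval_batches_py, iter_eval_batches_py_alt, if_pos (by omega),
      PySem.List.pyRange_of_neg _ _ hneg, if_neg (by omega)]
    rfl
  · rw [a_eq_pvBatches rows bs hbs, alt_eq_pvBatches rows bs hbs]
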